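-- pv_equiv track=rewrite | github.com/the9kim/python-algorithm-interview | Algorithm/kakao/t22/P6_2_Undamaged_Buildings.py | calc_cumulative_sum
-- ===== SOURCE A (Python) =====
-- from typing import List
--
-- def calc_cumulative_sum(skill: List[int], row_size: int, col_size: int) -> List[List[int]]:
--     cumulative_sum = [[0 for _ in range(col_size + 1)] for _ in range(row_size + 1)]
--
--     for t, r1, c1, r2, c2, degree in skill:
--         degree = degree if t == 2 else -degree
--
--         cumulative_sum[r1][c1] += degree
--         cumulative_sum[r2 + 1][c1] -= degree
--         cumulative_sum[r1][c2 + 1] -= degree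
--         cumulative_sum[r2 + 1][c2 + 1] += degree
--
--     for c in range(col_size + 1):
--         for r in range(1, row_size + 1):
--             cumulative_sum[r][c] += cumulative_sum[r - 1][c]
--
--     for r in range(row_size + 1):
--         for c in range(1, col_size + 1):
--             cumulative_sum[r][c] += cumulative_sum[r][c - 1]
--
--     return cumulative_sum
-- ===== SOURCE B (Python) =====
-- from typing import List
--
-- def calc_cumulative_sum(skill: List[int], row_size: int, col_size: int) -> List[List[int]]:
--     grid = [[0] * (col_size + 1) for _ in range(row_size + 1)]
--     for t, r1, c1, r2, c2, degree in skill: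
--         delta = degree if t == 2 else -degree
--         for r in range(r1, r2 + 1):
--             for c in range(c1, c2 + 1):
--                 grid[r][c] += delta
--     return grid
-- ===== Notes on version B (the rewrite author's own statement) =====
-- stated objective: simpler
-- what changed: B replaces the 2D difference-array (four corner writes per skill entry followed by two prefix-sum passes) by directly adding the delta to every cell of each skill rectangle, so the two prefix-sum passes disappear entirely.
-- outside the precondition, e.g. on calc_cumulative_sum([[2, -1, 0, 0, 0, 5]], 1, 1): A returns [[0, 0], [0, 0]], B returns [[5, 0], [5, 0]]
import Mathlib
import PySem

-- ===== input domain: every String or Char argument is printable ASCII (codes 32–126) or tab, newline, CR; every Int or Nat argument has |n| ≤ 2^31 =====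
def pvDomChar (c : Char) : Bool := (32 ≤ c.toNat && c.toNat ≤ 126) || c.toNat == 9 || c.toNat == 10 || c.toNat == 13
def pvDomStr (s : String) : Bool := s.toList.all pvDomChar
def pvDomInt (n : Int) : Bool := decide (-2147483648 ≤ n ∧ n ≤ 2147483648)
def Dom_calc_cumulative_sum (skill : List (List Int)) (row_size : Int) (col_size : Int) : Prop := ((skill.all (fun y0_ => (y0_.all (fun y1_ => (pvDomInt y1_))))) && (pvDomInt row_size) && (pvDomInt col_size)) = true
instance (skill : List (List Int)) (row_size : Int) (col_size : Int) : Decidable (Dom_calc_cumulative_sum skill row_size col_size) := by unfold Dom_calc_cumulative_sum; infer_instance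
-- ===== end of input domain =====

-- B replaces A's 2D difference array (four corner writes per entry plus two prefix-sum passes)
-- by adding the delta directly to every cell of each skill rectangle (objective: simpler).

-- shared helper: Python "g[i][j] += d"; where Python would raise IndexError (outside Pre_) it leaves g unchanged
def addAt (g : List (List Int)) (i j d : Int) : List (List Int) :=
  match PySem.List.pyGet? g i with
  | none => g
  | some row =>
    match PySem.List.pyGet? row j with
    | none => g
    | some v => PySem.List.pySetD g i (PySem.List.pySetD row j (v + d))

-- shared helper: Python read "g[i][j]" (always in range under Pre_; 0 outside, where Python raises)
def gridVal (g : List (List Int)) (i j : Int) : Int :=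
  PySem.List.pyGetD (PySem.List.pyGetD g i []) j 0

-- ===== PORT A =====
-- loop body of A's "for t, r1, c1, r2, c2, degree in skill"
def stepCorners (g : List (List Int)) (s : List Int) : List (List Int) :=
  match s with
  | [t, r1, c1, r2, c2, degree] =>
    let d := if t = 2 then degree else -degree
    addAt (addAt (addAt (addAt g r1 c1 d) (r2 + 1) c1 (-d)) r1 (c2 + 1) (-d)) (r2 + 1) (c2 + 1) d
  | _ => g

-- body of A's first prefix pass: "cumulative_sum[r][c] += cumulative_sum[r-1][c]"
def colStep (c : Int) (g : List (List Int)) (r : Int) : List (List Int) :=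
  addAt g r c (gridVal g (r - 1) c)

-- body of A's second prefix pass: "cumulative_sum[r][c] += cumulative_sum[r][c-1]"
def rowStep (r : Int) (g : List (List Int)) (c : Int) : List (List Int) :=
  addAt g r c (gridVal g r (c - 1))

def calc_cumulative_sum (skill : List (List Int)) (row_size : Int) (col_size : Int) : List (List Int) :=
  let cum0 : List (List Int) :=
    (PySem.List.pyRange 0 (row_size + 1) 1).map
      (fun _ => (PySem.List.pyRange 0 (col_size + 1) 1).map (fun _ => (0 : Int)))
  let cum1 := skill.foldl stepCorners cum0
  let cum2 := (PySem.List.pyRange 0 (col_size + 1) 1).foldl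
    (fun g c => (PySem.List.pyRange 1 (row_size + 1) 1).foldl (colStep c) g) cum1
  (PySem.List.pyRange 0 (row_size + 1) 1).foldl
    (fun g r => (PySem.List.pyRange 1 (col_size + 1) 1).foldl (rowStep r) g) cum2

-- ===== PORT B =====
-- loop body of B's "for t, r1, c1, r2, c2, degree in skill": add delta to every cell of the rectangle
def stepRect (g : List (List Int)) (s : List Int) : List (List Int) :=
  match s with
  | [t, r1, c1, r2, c2, degree] =>
    let d := if t = 2 then degree else -degree
    (PySem.List.pyRange r1 (r2 + 1) 1).foldl
      (fun g r => (PySem.List.pyRange c1 (c2 + 1) 1).foldl (fun g c => addAt g r c d) g) g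
  | _ => g

def calc_cumulative_sum_alt (skill : List (List Int)) (row_size : Int) (col_size : Int) : List (List Int) :=
  let grid : List (List Int) :=
    (PySem.List.pyRange 0 (row_size + 1) 1).map (fun _ => List.replicate (col_size + 1).toNat (0 : Int))
  skill.foldl stepRect grid

-- ===== PRECONDITION & SPEC =====
-- Pre_ restricts to the task's natural domain: each skill entry is a well-formed rectangle
-- [t, r1, c1, r2, c2, degree] with 0 ≤ r1 ≤ r2 and r2 + 1 ≤ row_size (likewise for columns), as the
-- kakao problem guarantees.  Outside it A either raises IndexError (r2 + 1 > row_size, far-negative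
-- coordinates, wrong entry length) or returns an accidental value via Python's negative-index
-- wraparound / an inverted rectangle, which B's direct range loops do not reproduce.
def Pre_calc_cumulative_sum (skill : List (List Int)) (row_size : Int) (col_size : Int) : Prop :=
  ∀ s ∈ skill, s.length = 6 ∧
    0 ≤ s.getD 1 0 ∧ s.getD 1 0 ≤ s.getD 3 0 ∧ s.getD 3 0 + 1 ≤ row_size ∧
    0 ≤ s.getD 2 0 ∧ s.getD 2 0 ≤ s.getD 4 0 ∧ s.getD 4 0 + 1 ≤ col_size
instance (skill : List (List Int)) (row_size : Int) (col_size : Int) : Decidable (Pre_calc_cumulative_sum skill row_size col_size) := by unfold Pre_calc_cumulative_sum; infer_instance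

def pvWitness_calc_cumulative_sum : List (List Int) × Int × Int := ([[2, 0, 0, 1, 1, 5], [1, 1, 0, 1, 1, 2]], 2, 2)

def Spec_calc_cumulative_sum (skill : List (List Int)) (row_size : Int) (col_size : Int) (out : List (List Int)) : Prop := out = calc_cumulative_sum_alt skill row_size col_size
instance (skill : List (List Int)) (row_size : Int) (col_size : Int) (out : List (List Int)) : Decidable (Spec_calc_cumulative_sum skill row_size col_size out) := by unfold Spec_calc_cumulative_sum; infer_instance

-- ===== CLAIM (what is proved, stated in full; the proofs are below) =====
def Claim_equal_calc_cumulative_sum : Prop := ∀ (skill : List (List Int)) (row_size : Int) (col_size : Int), Dom_calc_cumulative_sum skill row_size col_size → Pre_calc_cumulative_sum skill row_size col_size → Spec_calc_cumulative_sum skill row_size col_size (calc_cumulative_sum skill row_size col_size)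

-- ===== LEMMAS AND PROOFS =====

-- grid shape: N rows, each of length M
def pvShape (N M : Nat) (g : List (List Int)) : Prop := g.length = N ∧ ∀ row ∈ g, row.length = M

-- cell value at Nat coordinates
def pvVal (g : List (List Int)) (r c : Nat) : Int := (g.getD r []).getD c 0

theorem gridVal_natCast (g : List (List Int)) (r c : Nat) :
    gridVal g (r : Int) (c : Int) = pvVal g r c := by
  simp [gridVal, pvVal, PySem.List.pyGetD_natCast]

theorem addAt_nil (i j d : Int) : addAt [] i j d = [] := by
  simp [addAt, PySem.List.pyGet?]

theorem addAt_rows_nil {g : List (List Int)} (h : ∀ row ∈ g, row = []) (i j d : Int) :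
    addAt g i j d = g := by
  unfold addAt
  cases hg : PySem.List.pyGet? g i with
  | none => rfl
  | some row =>
    have : row = [] := h row (PySem.List.mem_of_pyGet?_eq_some g hg)
    subst this
    simp [PySem.List.pyGet?]

theorem foldl_fixpoint {α β : Type} (f : α → β → α) (a : α) (h : ∀ x, f a x = a) :
    ∀ l : List β, l.foldl f a = a := by
  intro l; induction l with
  | nil => rfl
  | cons x xs ih => simpa [List.foldl_cons, h x] using ih

theorem map_const_pyRange {α : Type} (n : Int) (x : α) :
    (PySem.List.pyRange 0 n 1).map (fun _ => x) = List.replicate n.toNat x := by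
  rw [PySem.List.pyRange_one]
  rw [List.map_map]
  simp [Function.comp_def, List.map_const']

theorem addAt_eq_set {N M : Nat} {g : List (List Int)} (hs : pvShape N M g)
    {i j : Int} (hi : 0 ≤ i) (hiN : i < (N : Int)) (hj : 0 ≤ j) (hjM : j < (M : Int)) (d : Int) :
    addAt g i j d =
      g.set i.toNat ((g.getD i.toNat []).set j.toNat ((g.getD i.toNat []).getD j.toNat 0 + d)) := by
  have hlen : g.length = N := hs.1
  have hiL : i < (g.length : Int) := by rw [hlen]; exact hiN
  have hitn : i.toNat < g.length := by omega
  have hrow : g.getD i.toNat [] = g[i.toNat] := List.getD_eq_getElem g [] hitn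
  have hrlen : g[i.toNat].length = M := hs.2 _ (List.getElem_mem hitn)
  have hjtn : j.toNat < g[i.toNat].length := by rw [hrlen]; omega
  have hjL : j < (g[i.toNat].length : Int) := by rw [hrlen]; exact hjM
  unfold addAt
  rw [PySem.List.pyGet?_eq_some_getElem g hi hiL]
  dsimp only
  rw [PySem.List.pyGet?_eq_some_getElem g[i.toNat] hj hjL]
  dsimp only
  rw [PySem.List.pySetD_of_nonneg _ _ hj, PySem.List.pySetD_of_nonneg _ _ hi]
  rw [hrow]
  rw [List.getD_eq_getElem g[i.toNat] 0 hjtn]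

theorem pvShape_addAt {N M : Nat} {g : List (List Int)} (hs : pvShape N M g)
    {i j : Int} (hi : 0 ≤ i) (hiN : i < (N : Int)) (hj : 0 ≤ j) (hjM : j < (M : Int)) (d : Int) :
    pvShape N M (addAt g i j d) := by
  rw [addAt_eq_set hs hi hiN hj hjM d]
  refine ⟨by simpa using hs.1, ?_⟩
  intro row hrow
  rcases List.mem_or_eq_of_mem_set hrow with h | h
  · exact hs.2 row h
  · subst h
    simp only [List.length_set]
    have hlen : g.length = N := hs.1
    have hitn : i.toNat < g.length := by omega
    exact hs.2 _ (List.getD_eq_getElem g [] hitn ▸ List.getElem_mem hitn)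

theorem pvVal_addAt {N M : Nat} {g : List (List Int)} (hs : pvShape N M g)
    {i j : Int} (hi : 0 ≤ i) (hiN : i < (N : Int)) (hj : 0 ≤ j) (hjM : j < (M : Int)) (d : Int)
    (r c : Nat) :
    pvVal (addAt g i j d) r c = pvVal g r c + (if (r : Int) = i ∧ (c : Int) = j then d else 0) := by
  rw [addAt_eq_set hs hi hiN hj hjM d]
  have hlen : g.length = N := hs.1
  have hitn : i.toNat < g.length := by omega
  have hjtn : j.toNat < (g.getD i.toNat []).length := by
    rw [List.getD_eq_getElem g [] hitn]
    have := hs.2 _ (List.getElem_mem hitn); omega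
  unfold pvVal
  simp only [List.getD]
  simp only [List.getD] at hjtn
  rw [List.getElem?_set]
  by_cases h1 : i.toNat = r
  · rw [if_pos h1, if_pos hitn]
    simp only [Option.getD_some]
    rw [List.getElem?_set]
    by_cases h2 : j.toNat = c
    · rw [if_pos h2, if_pos hjtn]
      have hcond : (r : Int) = i ∧ (c : Int) = j := by omega
      rw [if_pos hcond]
      simp only [Option.getD_some]
      rw [← h1, ← h2]
    · rw [if_neg h2]
      have hcond : ¬ ((r : Int) = i ∧ (c : Int) = j) := by omega
      rw [if_neg hcond, ← h1]
      simp
  · rw [if_neg h1]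
    have hcond : ¬ ((r : Int) = i ∧ (c : Int) = j) := by omega
    rw [if_neg hcond]
    simp


-- bounds a well-formed skill entry satisfies inside an (N, M) grid
def entryOk (N M : Nat) (s : List Int) : Prop := s.length = 6 ∧
  0 ≤ s.getD 1 0 ∧ s.getD 1 0 ≤ s.getD 3 0 ∧ s.getD 3 0 + 1 < (N : Int) ∧
  0 ≤ s.getD 2 0 ∧ s.getD 2 0 ≤ s.getD 4 0 ∧ s.getD 4 0 + 1 < (M : Int)

-- contribution of one entry to the difference array (A's four corner writes)
def cornersAt (s : List Int) (r c : Nat) : Int :=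
  match s with
  | [t, r1, c1, r2, c2, degree] =>
    (if t = 2 then degree else -degree) *
      ((if (r : Int) = r1 then 1 else 0) - (if (r : Int) = r2 + 1 then 1 else 0)) *
      ((if (c : Int) = c1 then 1 else 0) - (if (c : Int) = c2 + 1 then 1 else 0))
  | _ => 0

-- contribution of one entry to the final grid (B's rectangle add)
def rectAt (s : List Int) (r c : Nat) : Int :=
  match s with
  | [t, r1, c1, r2, c2, degree] =>
    if r1 ≤ (r : Int) ∧ (r : Int) ≤ r2 ∧ c1 ≤ (c : Int) ∧ (c : Int) ≤ c2 then
      (if t = 2 then degree else -degree) else 0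
  | _ => 0


theorem list_len6 {α : Type} {s : List α} (h : s.length = 6) :
    ∃ a b c d e f, s = [a, b, c, d, e, f] := by
  rcases s with _ | ⟨a, _ | ⟨b, _ | ⟨c, _ | ⟨d, _ | ⟨e, _ | ⟨f, rest⟩⟩⟩⟩⟩⟩ <;> simp at h
  exact ⟨a, b, c, d, e, f, by simp [h]⟩

theorem ite_and_mul (p q : Prop) [Decidable p] [Decidable q] (x : Int) :
    (if p ∧ q then x else 0) = (if p then (1 : Int) else 0) * ((if q then 1 else 0) * x) := by
  by_cases hp : p <;> by_cases hq : q <;> simp [hp, hq]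

theorem stepCorners_char {N M : Nat} {g : List (List Int)} (hs : pvShape N M g)
    {s : List Int} (hok : entryOk N M s) :
    pvShape N M (stepCorners g s) ∧
      ∀ r c : Nat, pvVal (stepCorners g s) r c = pvVal g r c + cornersAt s r c := by
  obtain ⟨hlen6, h1, h2, h3, h4, h5, h6⟩ := hok
  obtain ⟨t, r1, c1, r2, c2, dg, rfl⟩ := list_len6 hlen6
  simp only [List.getD_cons_zero, List.getD_cons_succ] at h1 h2 h3 h4 h5 h6
  unfold stepCorners
  dsimp only
  set D := if t = 2 then dg else -dg with hD
  have hb1 : (0 : Int) ≤ r1 := h1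
  have hb2 : r1 < (N : Int) := by omega
  have hb3 : (0 : Int) ≤ r2 + 1 := by omega
  have hb4 : r2 + 1 < (N : Int) := h3
  have hb5 : (0 : Int) ≤ c1 := h4
  have hb6 : c1 < (M : Int) := by omega
  have hb7 : (0 : Int) ≤ c2 + 1 := by omega
  have hb8 : c2 + 1 < (M : Int) := h6
  have s1 := pvShape_addAt hs hb1 hb2 hb5 hb6 D
  have s2 := pvShape_addAt s1 hb3 hb4 hb5 hb6 (-D)
  have s3 := pvShape_addAt s2 hb1 hb2 hb7 hb8 (-D)
  have s4 := pvShape_addAt s3 hb3 hb4 hb7 hb8 D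
  refine ⟨s4, ?_⟩
  intro r c
  rw [pvVal_addAt s3 hb3 hb4 hb7 hb8 D r c, pvVal_addAt s2 hb1 hb2 hb7 hb8 (-D) r c,
      pvVal_addAt s1 hb3 hb4 hb5 hb6 (-D) r c, pvVal_addAt hs hb1 hb2 hb5 hb6 D r c]
  simp only [cornersAt, ← hD]
  rw [ite_and_mul, ite_and_mul, ite_and_mul, ite_and_mul]
  ring

theorem rectCols_char {N M : Nat} (ρ c1 c2 d : Int) (hρ0 : 0 ≤ ρ) (hρN : ρ < (N : Int))
    (hc1 : 0 ≤ c1) (hc12 : c1 ≤ c2) (hc2M : c2 + 1 < (M : Int)) :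
    ∀ (n : Nat), (n : Int) ≤ c2 + 1 - c1 → ∀ g, pvShape N M g →
      pvShape N M ((List.range n).foldl (fun g (k : Nat) => addAt g ρ (c1 + (k : Int)) d) g) ∧
      ∀ r c : Nat, pvVal ((List.range n).foldl (fun g (k : Nat) => addAt g ρ (c1 + (k : Int)) d) g) r c =
        pvVal g r c + (if (r : Int) = ρ ∧ c1 ≤ (c : Int) ∧ (c : Int) < c1 + n then d else 0) := by
  intro n
  induction n with
  | zero =>
    intro _ g hg
    refine ⟨hg, ?_⟩
    intro r c
    simp only [List.range_zero, List.foldl_nil]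
    rw [if_neg (by push_cast; omega), add_zero]
  | succ n ih =>
    intro hn g hg
    have hn' : (n : Int) ≤ c2 + 1 - c1 := by push_cast at hn ⊢; omega
    obtain ⟨ih1, ih2⟩ := ih hn' g hg
    rw [List.range_succ, List.foldl_append, List.foldl_cons, List.foldl_nil]
    have hj0 : (0 : Int) ≤ c1 + n := by omega
    have hjM : c1 + (n : Int) < (M : Int) := by push_cast at hn; omega
    refine ⟨pvShape_addAt ih1 hρ0 hρN hj0 hjM d, ?_⟩
    intro r c
    rw [pvVal_addAt ih1 hρ0 hρN hj0 hjM d r c, ih2 r c]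
    push_cast
    split_ifs <;> omega

theorem rectRows_char {N M : Nat} (r1 r2 c1 c2 d : Int) (hr1 : 0 ≤ r1) (hr12 : r1 ≤ r2)
    (hr2N : r2 + 1 < (N : Int)) (hc1 : 0 ≤ c1) (hc12 : c1 ≤ c2) (hc2M : c2 + 1 < (M : Int)) :
    ∀ (n : Nat), (n : Int) ≤ r2 + 1 - r1 → ∀ g, pvShape N M g →
      pvShape N M ((List.range n).foldl
        (fun g (k : Nat) => (List.range (c2 + 1 - c1).toNat).foldl
          (fun g' (k' : Nat) => addAt g' (r1 + (k : Int)) (c1 + (k' : Int)) d) g) g) ∧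
      ∀ r c : Nat, pvVal ((List.range n).foldl
        (fun g (k : Nat) => (List.range (c2 + 1 - c1).toNat).foldl
          (fun g' (k' : Nat) => addAt g' (r1 + (k : Int)) (c1 + (k' : Int)) d) g) g) r c =
        pvVal g r c +
          (if r1 ≤ (r : Int) ∧ (r : Int) < r1 + n ∧ c1 ≤ (c : Int) ∧ (c : Int) ≤ c2 then d else 0) := by
  intro n
  induction n with
  | zero =>
    intro _ g hg
    refine ⟨hg, ?_⟩
    intro r c
    simp only [List.range_zero, List.foldl_nil]
    rw [if_neg (by push_cast; omega), add_zero]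
  | succ n ih =>
    intro hn g hg
    have hn' : (n : Int) ≤ r2 + 1 - r1 := by push_cast at hn ⊢; omega
    obtain ⟨ih1, ih2⟩ := ih hn' g hg
    rw [List.range_succ, List.foldl_append, List.foldl_cons, List.foldl_nil]
    have hρ0 : (0 : Int) ≤ r1 + n := by omega
    have hρN : r1 + (n : Int) < (N : Int) := by push_cast at hn; omega
    have hfull : (((c2 + 1 - c1).toNat : Nat) : Int) ≤ c2 + 1 - c1 := by omega
    obtain ⟨j1, j2⟩ := rectCols_char (r1 + (n : Int)) c1 c2 d hρ0 hρN hc1 hc12 hc2M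
      (c2 + 1 - c1).toNat hfull _ ih1
    refine ⟨j1, ?_⟩
    intro r c
    rw [j2 r c, ih2 r c]
    have hcast : (((c2 + 1 - c1).toNat : Nat) : Int) = c2 + 1 - c1 := by omega
    rw [hcast]
    push_cast
    split_ifs <;> omega

theorem stepRect_char {N M : Nat} {g : List (List Int)} (hs : pvShape N M g)
    {s : List Int} (hok : entryOk N M s) :
    pvShape N M (stepRect g s) ∧
      ∀ r c : Nat, pvVal (stepRect g s) r c = pvVal g r c + rectAt s r c := by
  obtain ⟨hlen6, h1, h2, h3, h4, h5, h6⟩ := hok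
  obtain ⟨t, r1, c1, r2, c2, dg, rfl⟩ := list_len6 hlen6
  simp only [List.getD_cons_zero, List.getD_cons_succ] at h1 h2 h3 h4 h5 h6
  unfold stepRect
  dsimp only
  set D := if t = 2 then dg else -dg with hD
  simp only [PySem.List.pyRange_one, List.foldl_map]
  have hfull : (((r2 + 1 - r1).toNat : Nat) : Int) ≤ r2 + 1 - r1 := by omega
  obtain ⟨j1, j2⟩ := rectRows_char r1 r2 c1 c2 D h1 h2 h3 h4 h5 h6
    (r2 + 1 - r1).toNat hfull g hs
  refine ⟨j1, ?_⟩
  intro r c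
  rw [j2 r c]
  simp only [rectAt, ← hD]
  have hcast : (((r2 + 1 - r1).toNat : Nat) : Int) = r2 + 1 - r1 := by omega
  rw [hcast]
  split_ifs <;> omega

theorem fold_skill {N M : Nat} (step : List (List Int) → List Int → List (List Int))
    (at_ : List Int → Nat → Nat → Int)
    (hstep : ∀ g s, pvShape N M g → entryOk N M s →
      pvShape N M (step g s) ∧ ∀ r c : Nat, pvVal (step g s) r c = pvVal g r c + at_ s r c) :
    ∀ (skill : List (List Int)) (g), pvShape N M g → (∀ s ∈ skill, entryOk N M s) →
      pvShape N M (skill.foldl step g) ∧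
      ∀ r c : Nat, pvVal (skill.foldl step g) r c =
        pvVal g r c + (skill.map (fun s => at_ s r c)).sum := by
  intro skill
  induction skill with
  | nil => intro g hg _; exact ⟨hg, by simp⟩
  | cons s ss ih =>
    intro g hg hpre
    have hok := hpre s (by simp)
    obtain ⟨h1, h2⟩ := hstep g s hg hok
    obtain ⟨h3, h4⟩ := ih (step g s) h1 (fun x hx => hpre x (by simp [hx]))
    refine ⟨h3, ?_⟩
    intro r c
    rw [List.foldl_cons, h4 r c, h2 r c]
    simp only [List.map_cons, List.sum_cons]
    ring

theorem colInner {N M : Nat} (c : Nat) (hc : c < M) :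
    ∀ (n : Nat), n < N → ∀ g, pvShape N M g →
      pvShape N M ((List.range n).foldl (fun g (k : Nat) => colStep (c : Int) g (1 + (k : Int))) g) ∧
      ∀ r c' : Nat, pvVal ((List.range n).foldl (fun g (k : Nat) => colStep (c : Int) g (1 + (k : Int))) g) r c' =
        if c' = c ∧ r ≤ n then ∑ i ∈ Finset.range (r + 1), pvVal g i c else pvVal g r c' := by
  intro n
  induction n with
  | zero =>
    intro _ g hg
    refine ⟨hg, ?_⟩
    intro r c'
    simp only [List.range_zero, List.foldl_nil]
    by_cases h : c' = c ∧ r ≤ 0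
    · obtain ⟨hc1, hr0⟩ := h
      have : r = 0 := by omega
      subst this; subst hc1
      rw [if_pos ⟨rfl, le_refl 0⟩, Finset.sum_range_one]
    · rw [if_neg h]
  | succ n ih =>
    intro hn g hg
    obtain ⟨ih1, ih2⟩ := ih (by omega) g hg
    rw [List.range_succ, List.foldl_append, List.foldl_cons, List.foldl_nil]
    have harg : (1 + (n : Int)) - 1 = ((n : Nat) : Int) := by push_cast; ring
    have hstep : ∀ g' : List (List Int), colStep (c : Int) g' (1 + (n : Int)) =
        addAt g' (1 + (n : Int)) (c : Int) (pvVal g' n c) := by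
      intro g'; unfold colStep; rw [harg, gridVal_natCast]
    rw [hstep]
    have hSn := ih2 n c
    rw [if_pos ⟨rfl, le_refl n⟩] at hSn
    rw [hSn]
    have hb1 : (0 : Int) ≤ 1 + (n : Int) := by omega
    have hb2 : 1 + (n : Int) < (N : Int) := by push_cast at hn ⊢; omega
    have hb3 : (0 : Int) ≤ (c : Int) := by omega
    have hb4 : (c : Int) < (M : Int) := by push_cast; omega
    refine ⟨pvShape_addAt ih1 hb1 hb2 hb3 hb4 _, ?_⟩
    intro r c'
    rw [pvVal_addAt ih1 hb1 hb2 hb3 hb4 _ r c', ih2 r c']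
    by_cases hcc : c' = c
    · subst hcc
      by_cases hr1 : r ≤ n
      · rw [if_pos (show c' = c' ∧ r ≤ n from ⟨rfl, hr1⟩),
            if_neg (show ¬ ((r : Int) = 1 + (n : Int) ∧ ((c' : Nat) : Int) = ((c' : Nat) : Int)) from by
              push_cast; omega),
            add_zero, if_pos (show c' = c' ∧ r ≤ n + 1 from ⟨rfl, by omega⟩)]
      · by_cases hr2 : r = n + 1
        · subst hr2
          rw [if_neg (show ¬ (c' = c' ∧ n + 1 ≤ n) from by omega),
              if_pos (show ((n + 1 : Nat) : Int) = 1 + (n : Int) ∧ ((c' : Nat) : Int) = ((c' : Nat) : Int) from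
                ⟨by push_cast; ring, rfl⟩),
              if_pos (show c' = c' ∧ n + 1 ≤ n + 1 from ⟨rfl, le_refl _⟩)]
          rw [Finset.sum_range_succ (n := n + 1)]
          ring
        · rw [if_neg (show ¬ (c' = c' ∧ r ≤ n) from by omega),
              if_neg (show ¬ ((r : Int) = 1 + (n : Int) ∧ ((c' : Nat) : Int) = ((c' : Nat) : Int)) from by
                push_cast; omega),
              add_zero, if_neg (show ¬ (c' = c' ∧ r ≤ n + 1) from by omega)]
    · rw [if_neg (show ¬ (c' = c ∧ r ≤ n) from fun hh => hcc hh.1),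
          if_neg (show ¬ ((r : Int) = 1 + (n : Int) ∧ ((c' : Nat) : Int) = ((c : Nat) : Int)) from by
            push_cast; omega),
          add_zero, if_neg (show ¬ (c' = c ∧ r ≤ n + 1) from fun hh => hcc hh.1)]

theorem colPass {n₀ M : Nat} :
    ∀ (m : Nat), m ≤ M → ∀ g, pvShape (n₀ + 1) M g →
      pvShape (n₀ + 1) M ((List.range m).foldl
        (fun g (k : Nat) => (List.range n₀).foldl (fun g' (k' : Nat) => colStep (k : Int) g' (1 + (k' : Int))) g) g) ∧
      ∀ r c : Nat, r < n₀ + 1 → c < M →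
        pvVal ((List.range m).foldl
          (fun g (k : Nat) => (List.range n₀).foldl (fun g' (k' : Nat) => colStep (k : Int) g' (1 + (k' : Int))) g) g) r c =
          if c < m then ∑ i ∈ Finset.range (r + 1), pvVal g i c else pvVal g r c := by
  intro m
  induction m with
  | zero =>
    intro _ g hg
    refine ⟨hg, ?_⟩
    intro r c _ _
    simp only [List.range_zero, List.foldl_nil]
    rw [if_neg (by omega)]
  | succ m ih =>
    intro hm g hg
    obtain ⟨ih1, ih2⟩ := ih (by omega) g hg
    rw [List.range_succ, List.foldl_append, List.foldl_cons, List.foldl_nil]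
    obtain ⟨h1, h2⟩ := colInner (N := n₀ + 1) m (by omega) n₀ (by omega) _ ih1
    refine ⟨h1, ?_⟩
    intro r c hr hc
    rw [h2 r c]
    by_cases hcm : c = m
    · subst hcm
      rw [if_pos (show c = c ∧ r ≤ n₀ from ⟨rfl, by omega⟩), if_pos (show c < c + 1 from by omega)]
      apply Finset.sum_congr rfl
      intro i hi
      have hiN : i < n₀ + 1 := by have := Finset.mem_range.mp hi; omega
      rw [ih2 i c hiN hc, if_neg (by omega : ¬ c < c)]
    · rw [if_neg (show ¬ (c = m ∧ r ≤ n₀) from fun hh => hcm hh.1), ih2 r c hr hc]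
      by_cases hlt : c < m
      · rw [if_pos hlt, if_pos (by omega : c < m + 1)]
      · rw [if_neg hlt, if_neg (by omega : ¬ c < m + 1)]

theorem rowInner {N M : Nat} (ρ : Nat) (hρ : ρ < N) :
    ∀ (n : Nat), n < M → ∀ g, pvShape N M g →
      pvShape N M ((List.range n).foldl (fun g (k : Nat) => rowStep (ρ : Int) g (1 + (k : Int))) g) ∧
      ∀ r c : Nat, pvVal ((List.range n).foldl (fun g (k : Nat) => rowStep (ρ : Int) g (1 + (k : Int))) g) r c =
        if r = ρ ∧ c ≤ n then ∑ j ∈ Finset.range (c + 1), pvVal g ρ j else pvVal g r c := by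
  intro n
  induction n with
  | zero =>
    intro _ g hg
    refine ⟨hg, ?_⟩
    intro r c
    simp only [List.range_zero, List.foldl_nil]
    by_cases h : r = ρ ∧ c ≤ 0
    · obtain ⟨hr1, hc0⟩ := h
      have : c = 0 := by omega
      subst this; subst hr1
      rw [if_pos ⟨rfl, le_refl 0⟩, Finset.sum_range_one]
    · rw [if_neg h]
  | succ n ih =>
    intro hn g hg
    obtain ⟨ih1, ih2⟩ := ih (by omega) g hg
    rw [List.range_succ, List.foldl_append, List.foldl_cons, List.foldl_nil]
    have harg : (1 + (n : Int)) - 1 = ((n : Nat) : Int) := by push_cast; ring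
    have hstep : ∀ g' : List (List Int), rowStep (ρ : Int) g' (1 + (n : Int)) =
        addAt g' (ρ : Int) (1 + (n : Int)) (pvVal g' ρ n) := by
      intro g'; unfold rowStep; rw [harg, gridVal_natCast]
    rw [hstep]
    have hSn := ih2 ρ n
    rw [if_pos ⟨rfl, le_refl n⟩] at hSn
    rw [hSn]
    have hb1 : (0 : Int) ≤ (ρ : Int) := by omega
    have hb2 : (ρ : Int) < (N : Int) := by push_cast; omega
    have hb3 : (0 : Int) ≤ 1 + (n : Int) := by omega
    have hb4 : 1 + (n : Int) < (M : Int) := by push_cast at hn ⊢; omega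
    refine ⟨pvShape_addAt ih1 hb1 hb2 hb3 hb4 _, ?_⟩
    intro r c
    rw [pvVal_addAt ih1 hb1 hb2 hb3 hb4 _ r c, ih2 r c]
    by_cases hrr : r = ρ
    · subst hrr
      by_cases hc1 : c ≤ n
      · rw [if_pos (show r = r ∧ c ≤ n from ⟨rfl, hc1⟩),
            if_neg (show ¬ (((r : Nat) : Int) = ((r : Nat) : Int) ∧ (c : Int) = 1 + (n : Int)) from by
              push_cast; omega),
            add_zero, if_pos (show r = r ∧ c ≤ n + 1 from ⟨rfl, by omega⟩)]
      · by_cases hc2 : c = n + 1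
        · subst hc2
          rw [if_neg (show ¬ (r = r ∧ n + 1 ≤ n) from by omega),
              if_pos (show ((r : Nat) : Int) = ((r : Nat) : Int) ∧ ((n + 1 : Nat) : Int) = 1 + (n : Int) from
                ⟨rfl, by push_cast; ring⟩),
              if_pos (show r = r ∧ n + 1 ≤ n + 1 from ⟨rfl, le_refl _⟩)]
          rw [Finset.sum_range_succ (n := n + 1)]
          ring
        · rw [if_neg (show ¬ (r = r ∧ c ≤ n) from by omega),
              if_neg (show ¬ (((r : Nat) : Int) = ((r : Nat) : Int) ∧ (c : Int) = 1 + (n : Int)) from by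
                push_cast; omega),
              add_zero, if_neg (show ¬ (r = r ∧ c ≤ n + 1) from by omega)]
    · rw [if_neg (show ¬ (r = ρ ∧ c ≤ n) from fun hh => hrr hh.1),
          if_neg (show ¬ ((r : Int) = ((ρ : Nat) : Int) ∧ (c : Int) = 1 + (n : Int)) from by
            push_cast; omega),
          add_zero, if_neg (show ¬ (r = ρ ∧ c ≤ n + 1) from fun hh => hrr hh.1)]

theorem rowPass {N m₀ : Nat} :
    ∀ (m : Nat), m ≤ N → ∀ g, pvShape N (m₀ + 1) g →
      pvShape N (m₀ + 1) ((List.range m).foldl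
        (fun g (k : Nat) => (List.range m₀).foldl (fun g' (k' : Nat) => rowStep (k : Int) g' (1 + (k' : Int))) g) g) ∧
      ∀ r c : Nat, r < N → c < m₀ + 1 →
        pvVal ((List.range m).foldl
          (fun g (k : Nat) => (List.range m₀).foldl (fun g' (k' : Nat) => rowStep (k : Int) g' (1 + (k' : Int))) g) g) r c =
          if r < m then ∑ j ∈ Finset.range (c + 1), pvVal g r j else pvVal g r c := by
  intro m
  induction m with
  | zero =>
    intro _ g hg
    refine ⟨hg, ?_⟩
    intro r c _ _
    simp only [List.range_zero, List.foldl_nil]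
    rw [if_neg (by omega)]
  | succ m ih =>
    intro hm g hg
    obtain ⟨ih1, ih2⟩ := ih (by omega) g hg
    rw [List.range_succ, List.foldl_append, List.foldl_cons, List.foldl_nil]
    obtain ⟨h1, h2⟩ := rowInner (M := m₀ + 1) m (by omega) m₀ (by omega) _ ih1
    refine ⟨h1, ?_⟩
    intro r c hr hc
    rw [h2 r c]
    by_cases hrm : r = m
    · subst hrm
      rw [if_pos (show r = r ∧ c ≤ m₀ from ⟨rfl, by omega⟩), if_pos (show r < r + 1 from by omega)]
      apply Finset.sum_congr rfl
      intro j hj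
      have hjM : j < m₀ + 1 := by have := Finset.mem_range.mp hj; omega
      rw [ih2 r j hr hjM, if_neg (by omega : ¬ r < r)]
    · rw [if_neg (show ¬ (r = m ∧ c ≤ m₀) from fun hh => hrm hh.1), ih2 r c hr hc]
      by_cases hlt : r < m
      · rw [if_pos hlt, if_pos (by omega : r < m + 1)]
      · rw [if_neg hlt, if_neg (by omega : ¬ r < m + 1)]

theorem sum_ind (a : Int) (n : Nat) :
    ∑ i ∈ Finset.range n, (if (i : Int) = a then (1 : Int) else 0) =
      if 0 ≤ a ∧ a < (n : Int) then 1 else 0 := by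
  induction n with
  | zero =>
    simp only [Finset.range_zero, Finset.sum_empty]
    rw [if_neg (by omega)]
  | succ n ih =>
    rw [Finset.sum_range_succ, ih]
    push_cast
    split_ifs <;> omega

theorem entry_sum {N M : Nat} {s : List Int} (hok : entryOk N M s) (r c : Nat) :
    ∑ j ∈ Finset.range (c + 1), ∑ i ∈ Finset.range (r + 1), cornersAt s i j = rectAt s r c := by
  obtain ⟨hlen6, h1, h2, h3, h4, h5, h6⟩ := hok
  obtain ⟨t, r1, c1, r2, c2, dg, rfl⟩ := list_len6 hlen6
  simp only [List.getD_cons_zero, List.getD_cons_succ] at h1 h2 h3 h4 h5 h6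
  simp only [cornersAt, rectAt]
  set D := if t = 2 then dg else -dg with hD
  have hX : ∀ m : Nat, ∑ i ∈ Finset.range m,
      ((if (i : Int) = r1 then (1 : Int) else 0) - (if (i : Int) = r2 + 1 then 1 else 0)) =
      (if 0 ≤ r1 ∧ r1 < (m : Int) then (1 : Int) else 0) -
        (if 0 ≤ r2 + 1 ∧ r2 + 1 < (m : Int) then 1 else 0) := by
    intro m
    rw [Finset.sum_sub_distrib, sum_ind, sum_ind]
  have hY : ∀ m : Nat, ∑ j ∈ Finset.range m,
      ((if (j : Int) = c1 then (1 : Int) else 0) - (if (j : Int) = c2 + 1 then 1 else 0)) =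
      (if 0 ≤ c1 ∧ c1 < (m : Int) then (1 : Int) else 0) -
        (if 0 ≤ c2 + 1 ∧ c2 + 1 < (m : Int) then 1 else 0) := by
    intro m
    rw [Finset.sum_sub_distrib, sum_ind, sum_ind]
  calc ∑ j ∈ Finset.range (c + 1), ∑ i ∈ Finset.range (r + 1),
        D * ((if (i : Int) = r1 then (1 : Int) else 0) - (if (i : Int) = r2 + 1 then 1 else 0)) *
          ((if (j : Int) = c1 then (1 : Int) else 0) - (if (j : Int) = c2 + 1 then 1 else 0))
      = ∑ j ∈ Finset.range (c + 1),
          ((∑ i ∈ Finset.range (r + 1),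
            ((if (i : Int) = r1 then (1 : Int) else 0) - (if (i : Int) = r2 + 1 then 1 else 0))) *
          (D * ((if (j : Int) = c1 then (1 : Int) else 0) - (if (j : Int) = c2 + 1 then 1 else 0)))) := by
        apply Finset.sum_congr rfl
        intro j _
        rw [Finset.sum_mul]
        apply Finset.sum_congr rfl
        intro i _
        ring_nf
    _ = (∑ i ∈ Finset.range (r + 1),
          ((if (i : Int) = r1 then (1 : Int) else 0) - (if (i : Int) = r2 + 1 then 1 else 0))) *
        (D * (∑ j ∈ Finset.range (c + 1),
          ((if (j : Int) = c1 then (1 : Int) else 0) - (if (j : Int) = c2 + 1 then 1 else 0)))) := by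
        rw [← Finset.mul_sum, ← Finset.mul_sum]
    _ = rectAt [t, r1, c1, r2, c2, dg] r c := by
        rw [hX, hY]
        simp only [rectAt, ← hD]
        clear_value D
        push_cast
        split_ifs <;> omega

theorem double_sum_corners {N M : Nat} (skill : List (List Int))
    (hpre : ∀ s ∈ skill, entryOk N M s) (r c : Nat) :
    ∑ j ∈ Finset.range (c + 1), ∑ i ∈ Finset.range (r + 1),
        (skill.map (fun s => cornersAt s i j)).sum =
      (skill.map (fun s => rectAt s r c)).sum := by
  induction skill with
  | nil => simp
  | cons s ss ih =>
    simp only [List.map_cons, List.sum_cons]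
    have expand : ∑ j ∈ Finset.range (c + 1), ∑ i ∈ Finset.range (r + 1),
        (cornersAt s i j + (ss.map (fun s => cornersAt s i j)).sum) =
        (∑ j ∈ Finset.range (c + 1), ∑ i ∈ Finset.range (r + 1), cornersAt s i j) +
          ∑ j ∈ Finset.range (c + 1), ∑ i ∈ Finset.range (r + 1),
            (ss.map (fun s => cornersAt s i j)).sum := by
      rw [← Finset.sum_add_distrib]
      apply Finset.sum_congr rfl
      intro j _
      rw [← Finset.sum_add_distrib]
    rw [expand, entry_sum (hpre s (by simp)) r c, ih (fun x hx => hpre x (by simp [hx]))]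

theorem grid_ext {N M : Nat} {g h : List (List Int)} (hg : pvShape N M g) (hh : pvShape N M h)
    (hv : ∀ r c : Nat, r < N → c < M → pvVal g r c = pvVal h r c) : g = h := by
  have hgl : g.length = N := hg.1
  have hhl : h.length = N := hh.1
  apply List.ext_getElem (by omega)
  intro r h1 h2
  apply List.ext_getElem
  · rw [hg.2 _ (List.getElem_mem h1), hh.2 _ (List.getElem_mem h2)]
  intro c hc1 hc2
  have hrN : r < N := by omega
  have hcM : c < M := by
    have := hg.2 _ (List.getElem_mem h1); omega
  have hval := hv r c hrN hcM
  unfold pvVal at hval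
  rw [List.getD_eq_getElem g [] h1, List.getD_eq_getElem h [] h2,
      List.getD_eq_getElem _ 0 hc1, List.getD_eq_getElem _ 0 hc2] at hval
  exact hval

theorem pvShape_zero (n m : Nat) : pvShape n m (List.replicate n (List.replicate m (0 : Int))) := by
  constructor
  · simp
  · intro row hrow
    simp [List.eq_of_mem_replicate hrow]

theorem pvVal_zero (n m r c : Nat) : pvVal (List.replicate n (List.replicate m (0 : Int))) r c = 0 := by
  unfold pvVal
  simp only [List.getD, List.getElem?_replicate]
  by_cases h : r < n <;> simp [h]

theorem stepCorners_nil (s : List Int) : stepCorners [] s = [] := by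
  unfold stepCorners
  split <;> simp [addAt_nil]

theorem stepRect_nil (s : List Int) : stepRect [] s = [] := by
  unfold stepRect
  split
  · apply foldl_fixpoint
    intro x
    apply foldl_fixpoint
    intro y
    exact addAt_nil _ _ _
  · rfl

theorem stepCorners_rows_nil {g : List (List Int)} (h : ∀ row ∈ g, row = []) (s : List Int) :
    stepCorners g s = g := by
  unfold stepCorners
  split <;> simp [addAt_rows_nil h]

theorem stepRect_rows_nil {g : List (List Int)} (h : ∀ row ∈ g, row = []) (s : List Int) :
    stepRect g s = g := by
  unfold stepRect
  split
  · apply foldl_fixpoint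
    intro x
    apply foldl_fixpoint
    intro y
    exact addAt_rows_nil h _ _ _
  · rfl


theorem entryOk_of_pre {skill : List (List Int)} {rs cs : Int} (hrs : 0 ≤ rs) (hcs : 0 ≤ cs)
    (hpre : Pre_calc_cumulative_sum skill rs cs) :
    ∀ s ∈ skill, entryOk (rs.toNat + 1) (cs.toNat + 1) s := by
  intro s hsm
  obtain ⟨hl, a1, a2, a3, a4, a5, a6⟩ := hpre s hsm
  exact ⟨hl, a1, a2, by push_cast; omega, a4, a5, by push_cast; omega⟩

theorem zero_grid_eq (rs cs : Int) (hrs : 0 ≤ rs) (hcs : 0 ≤ cs) :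
    (PySem.List.pyRange 0 (rs + 1) 1).map
        (fun _ => (PySem.List.pyRange 0 (cs + 1) 1).map (fun _ => (0 : Int))) =
      List.replicate (rs.toNat + 1) (List.replicate (cs.toNat + 1) (0 : Int)) := by
  rw [map_const_pyRange, map_const_pyRange,
      show (rs + 1).toNat = rs.toNat + 1 from by omega,
      show (cs + 1).toNat = cs.toNat + 1 from by omega]

theorem zero_grid_alt_eq (rs cs : Int) (hrs : 0 ≤ rs) (hcs : 0 ≤ cs) :
    (PySem.List.pyRange 0 (rs + 1) 1).map (fun _ => List.replicate (cs + 1).toNat (0 : Int)) =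
      List.replicate (rs.toNat + 1) (List.replicate (cs.toNat + 1) (0 : Int)) := by
  rw [map_const_pyRange,
      show (rs + 1).toNat = rs.toNat + 1 from by omega,
      show (cs + 1).toNat = cs.toNat + 1 from by omega]

theorem portB_char (skill : List (List Int)) (rs cs : Int) (hrs : 0 ≤ rs) (hcs : 0 ≤ cs)
    (hok : ∀ s ∈ skill, entryOk (rs.toNat + 1) (cs.toNat + 1) s) :
    pvShape (rs.toNat + 1) (cs.toNat + 1) (calc_cumulative_sum_alt skill rs cs) ∧
    ∀ r c : Nat, pvVal (calc_cumulative_sum_alt skill rs cs) r c =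
      (skill.map (fun s => rectAt s r c)).sum := by
  simp only [calc_cumulative_sum_alt]
  rw [zero_grid_alt_eq rs cs hrs hcs]
  obtain ⟨h1, h2⟩ := fold_skill stepRect rectAt (fun g s hg hok' => stepRect_char hg hok')
    skill _ (pvShape_zero _ _) hok
  exact ⟨h1, fun r c => by rw [h2 r c, pvVal_zero, zero_add]⟩

theorem portA_char (skill : List (List Int)) (rs cs : Int) (hrs : 0 ≤ rs) (hcs : 0 ≤ cs)
    (hok : ∀ s ∈ skill, entryOk (rs.toNat + 1) (cs.toNat + 1) s) :
    pvShape (rs.toNat + 1) (cs.toNat + 1) (calc_cumulative_sum skill rs cs) ∧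
    ∀ r c : Nat, r < rs.toNat + 1 → c < cs.toNat + 1 →
      pvVal (calc_cumulative_sum skill rs cs) r c =
        ∑ j ∈ Finset.range (c + 1), ∑ i ∈ Finset.range (r + 1),
          (skill.map (fun s => cornersAt s i j)).sum := by
  simp only [calc_cumulative_sum]
  rw [zero_grid_eq rs cs hrs hcs]
  have hc1 : PySem.List.pyRange 0 (cs + 1) 1 =
      (List.range (cs.toNat + 1)).map (fun (k : Nat) => (0 : Int) + (k : Int)) := by
    rw [PySem.List.pyRange_one, show (cs + 1 - 0).toNat = cs.toNat + 1 from by omega]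
  have hr1 : PySem.List.pyRange 1 (rs + 1) 1 =
      (List.range rs.toNat).map (fun (k : Nat) => (1 : Int) + (k : Int)) := by
    rw [PySem.List.pyRange_one, show (rs + 1 - 1).toNat = rs.toNat from by omega]
  have hr0 : PySem.List.pyRange 0 (rs + 1) 1 =
      (List.range (rs.toNat + 1)).map (fun (k : Nat) => (0 : Int) + (k : Int)) := by
    rw [PySem.List.pyRange_one, show (rs + 1 - 0).toNat = rs.toNat + 1 from by omega]
  have hc2 : PySem.List.pyRange 1 (cs + 1) 1 =
      (List.range cs.toNat).map (fun (k : Nat) => (1 : Int) + (k : Int)) := by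
    rw [PySem.List.pyRange_one, show (cs + 1 - 1).toNat = cs.toNat from by omega]
  simp only [hc1, hr1, hr0, hc2, List.foldl_map, zero_add]
  obtain ⟨hA1, hA2⟩ := fold_skill stepCorners cornersAt (fun g s hg hok' => stepCorners_char hg hok')
    skill _ (pvShape_zero _ _) hok
  obtain ⟨hC1, hC2⟩ := colPass (n₀ := rs.toNat) (M := cs.toNat + 1) (cs.toNat + 1) (le_refl _) _ hA1
  obtain ⟨hR1, hR2⟩ := rowPass (N := rs.toNat + 1) (m₀ := cs.toNat) (rs.toNat + 1) (le_refl _) _ hC1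
  refine ⟨hR1, ?_⟩
  intro r c hr hc
  rw [hR2 r c hr hc, if_pos hr]
  apply Finset.sum_congr rfl
  intro j hj
  have hjM : j < cs.toNat + 1 := by have := Finset.mem_range.mp hj; omega
  rw [hC2 r j hr hjM, if_pos (by omega : j < cs.toNat + 1)]
  apply Finset.sum_congr rfl
  intro i hi
  rw [hA2 i j, pvVal_zero, zero_add]

theorem main_pos (skill : List (List Int)) (rs cs : Int) (hrs : 0 ≤ rs) (hcs : 0 ≤ cs)
    (hok : ∀ s ∈ skill, entryOk (rs.toNat + 1) (cs.toNat + 1) s) :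
    calc_cumulative_sum skill rs cs = calc_cumulative_sum_alt skill rs cs := by
  obtain ⟨hA1, hA2⟩ := portA_char skill rs cs hrs hcs hok
  obtain ⟨hB1, hB2⟩ := portB_char skill rs cs hrs hcs hok
  apply grid_ext hA1 hB1
  intro r c hr hc
  rw [hA2 r c hr hc, hB2 r c, double_sum_corners skill hok r c]

theorem case_neg_rs (skill : List (List Int)) (rs cs : Int) (h : rs < 0) :
    calc_cumulative_sum skill rs cs = calc_cumulative_sum_alt skill rs cs := by
  simp only [calc_cumulative_sum, calc_cumulative_sum_alt]
  simp only [PySem.List.pyRange_one_eq_nil (a := 0) (b := rs + 1) (by omega),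
             PySem.List.pyRange_one_eq_nil (a := 1) (b := rs + 1) (by omega),
             List.map_nil, List.foldl_nil]
  rw [foldl_fixpoint stepCorners [] stepCorners_nil skill,
      foldl_fixpoint stepRect [] stepRect_nil skill,
      foldl_fixpoint _ ([] : List (List Int)) (fun _ => rfl) _]

theorem case_neg_cs (skill : List (List Int)) (rs cs : Int) (hrs : 0 ≤ rs) (h : cs < 0) :
    calc_cumulative_sum skill rs cs = calc_cumulative_sum_alt skill rs cs := by
  simp only [calc_cumulative_sum, calc_cumulative_sum_alt]
  simp only [PySem.List.pyRange_one_eq_nil (a := 0) (b := cs + 1) (by omega),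
             PySem.List.pyRange_one_eq_nil (a := 1) (b := cs + 1) (by omega),
             show (cs + 1).toNat = 0 from by omega,
             List.replicate_zero, List.map_nil, List.foldl_nil]
  have hrows : ∀ row ∈ (PySem.List.pyRange 0 (rs + 1) 1).map (fun _ => ([] : List Int)), row = [] := by
    intro row hrow
    rcases List.mem_map.mp hrow with ⟨a, _, hEq⟩
    exact hEq.symm
  rw [foldl_fixpoint stepCorners _ (stepCorners_rows_nil hrows) skill,
      foldl_fixpoint stepRect _ (stepRect_rows_nil hrows) skill,
      foldl_fixpoint _ _ (fun _ => rfl) _]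

-- ===== VERDICT (by name: the statement is the Claim_ definition above) =====
theorem calc_cumulative_sum_spec : Claim_equal_calc_cumulative_sum := by
  intro skill rs cs _ hpre
  unfold Spec_calc_cumulative_sum
  by_cases hrs : 0 ≤ rs
  · by_cases hcs : 0 ≤ cs
    · exact main_pos skill rs cs hrs hcs (entryOk_of_pre hrs hcs hpre)
    · exact case_neg_cs skill rs cs hrs (by omega)
  · exact case_neg_rs skill rs cs (by omega)
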